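-- pv_equiv track=rewrite | github.com/thangdang/innerlog-ai | innerlog-ai-engine/app/services/pattern_detector.py | _pattern_mood_drop
-- ===== SOURCE A (Python) =====
-- from typing import List
--
-- def _pattern_mood_drop(moods: List[int]) -> List[dict]:
--     """Mood dropping 3+ consecutive days."""
--     consecutive = 0
--     for i in range(1, len(moods)):
--         if moods[i] < moods[i - 1]:
--             consecutive += 1
--         else:
--             consecutive = 0
--         if consecutive >= 2:
--             return [{
--                 "type": "mood_drop",
--                 "message": "Tâm trạng giảm liên tục. Hãy dành thời gian cho bản thân.",
--                 "severity": "warning",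
--             }]
--     return []
-- ===== SOURCE B (Python) =====
-- from typing import List
--
-- def _pattern_mood_drop(moods: List[int]) -> List[dict]:
--     """Mood dropping 3+ consecutive days: any strictly decreasing triple."""
--     if any(moods[i] < moods[i - 1] < moods[i - 2] for i in range(2, len(moods))):
--         return [{
--             "type": "mood_drop",
--             "message": "Tâm trạng giảm liên tục. Hãy dành thời gian cho bản thân.",
--             "severity": "warning",
--         }]
--     return []
-- ===== Notes on version B (the rewrite author's own statement) =====
-- stated objective: simpler
-- what changed: Replaces the stateful consecutive-counter loop with reset and early return by a direct window predicate: any strictly decreasing triple moods[i-2] > moods[i-1] > moods[i].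
import Mathlib
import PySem

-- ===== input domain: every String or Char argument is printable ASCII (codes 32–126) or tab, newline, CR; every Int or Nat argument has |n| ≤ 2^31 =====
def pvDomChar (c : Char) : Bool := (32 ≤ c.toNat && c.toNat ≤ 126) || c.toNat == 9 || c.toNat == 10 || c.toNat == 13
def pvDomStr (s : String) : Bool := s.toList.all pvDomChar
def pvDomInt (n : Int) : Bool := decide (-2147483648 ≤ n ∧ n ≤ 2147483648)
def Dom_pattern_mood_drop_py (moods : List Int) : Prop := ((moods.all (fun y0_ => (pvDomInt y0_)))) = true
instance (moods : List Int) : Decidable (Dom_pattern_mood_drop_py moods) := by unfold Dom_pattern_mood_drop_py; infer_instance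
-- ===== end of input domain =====

-- B replaces A's stateful counter-with-reset loop by a direct strictly-decreasing-triple window check (objective: simpler).

-- the dict literal returned on detection (dict → association list)
def pvMoodDropDict : List (String × String) :=
  [("type", "mood_drop"),
   ("message", "Tâm trạng giảm liên tục. Hãy dành thời gian cho bản thân."),
   ("severity", "warning")]

-- ===== PORT A =====
-- the for-loop over i in range(1, len): traversed as (prev element, counter, remaining tail)
def pvLoopA (prev : Int) (consecutive : Nat) (rest : List Int) : List (List (String × String)) :=
  match rest with
  | [] => []
  | x :: xs =>
    let c := if x < prev then consecutive + 1 else 0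
    if c ≥ 2 then [pvMoodDropDict] else pvLoopA x c xs

def pattern_mood_drop_py (moods : List Int) : List (List (String × String)) :=
  match moods with
  | [] => []
  | m :: rest => pvLoopA m 0 rest

-- ===== PORT B =====
-- any(moods[i] < moods[i-1] < moods[i-2] for i in range(2, len(moods))): sliding 3-window
def pvHasTriple : List Int → Bool
  | a :: b :: c :: rest => (b < a && c < b) || pvHasTriple (b :: c :: rest)
  | _ => false

def pattern_mood_drop_py_alt (moods : List Int) : List (List (String × String)) :=
  if pvHasTriple moods then [pvMoodDropDict] else []

-- ===== PRECONDITION & SPEC =====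
def Spec_pattern_mood_drop_py (moods : List Int) (out : List (List (String × String))) : Prop := out = pattern_mood_drop_py_alt moods
instance (moods : List Int) (out : List (List (String × String))) : Decidable (Spec_pattern_mood_drop_py moods out) := by unfold Spec_pattern_mood_drop_py; infer_instance

-- ===== CLAIM (what is proved, stated in full; the proofs are below) =====
def Claim_equal_pattern_mood_drop_py : Prop := ∀ (moods : List Int), Dom_pattern_mood_drop_py moods → Spec_pattern_mood_drop_py moods (pattern_mood_drop_py moods)

-- ===== LEMMAS AND PROOFS =====

-- whether the first step of rest continues a decrease below prev
def pvFirstDown (prev : Int) : List Int → Bool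
  | [] => false
  | x :: _ => decide (x < prev)

theorem pvLoopA_char (rest : List Int) : ∀ (prev : Int) (consecutive : Nat),
    pvLoopA prev consecutive rest =
      if (decide (1 ≤ consecutive) && pvFirstDown prev rest) || pvHasTriple (prev :: rest)
      then [pvMoodDropDict] else [] := by
  induction rest with
  | nil => intro prev c; simp [pvLoopA, pvFirstDown, pvHasTriple]
  | cons x xs ih =>
    intro prev c
    by_cases hx : x < prev
    · by_cases hc : 1 ≤ c
      · simp [pvLoopA, pvFirstDown, hx, hc, Nat.succ_le_succ hc]
      · have hc0 : c = 0 := by omega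
        subst hc0
        simp only [pvLoopA, if_pos hx, show ¬ (0 + 1 ≥ 2) by omega]
        rw [ih]
        cases xs with
        | nil => simp [pvFirstDown, pvHasTriple]
        | cons y ys => simp [pvFirstDown, pvHasTriple, hx]
    · simp only [pvLoopA, if_neg hx, show ¬ ((0:Nat) ≥ 2) by omega]
      rw [ih]
      cases xs with
      | nil => simp [pvFirstDown, pvHasTriple, hx]
      | cons y ys => simp [pvFirstDown, pvHasTriple, hx]

-- ===== VERDICT (by name: the statement is the Claim_ definition above) =====
theorem pattern_mood_drop_py_spec : Claim_equal_pattern_mood_drop_py := by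
  intro moods _
  unfold Spec_pattern_mood_drop_py pattern_mood_drop_py pattern_mood_drop_py_alt
  cases moods with
  | nil => simp [pvHasTriple]
  | cons m rest => show pvLoopA m 0 rest = _; rw [pvLoopA_char]; simp
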